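-- pv_equiv track=rewrite | github.com/eliana817/Projet_crypto | chall1/methode1.py | hex2b64
-- ===== SOURCE A (Python) =====
-- def hex2binary(cypher):
--     """
--     Converts hexadecimal to binary
--
--     - cypher: the hex to convert
--
--     Returns: the binary value
--     """
--     dec = int(cypher, 16)
--     bin = ''
--     while dec !=0:
--         result = dec % 2
--         bin = f"{result}" + bin
--         dec = dec // 2
--     return bin
--
-- def hex2b64(cypher):
--     """
--     Converts hexadecimal to base 64.
--
--     - cypher: the hexadecimal to convert to base 64
--
--     Return: the base64 value
--     """
--     encode = ""
--     index = {0: 'A', 1: 'B', 2: 'C', 3: 'D', 4: 'E', 5: 'F',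
--              6: 'G', 7: 'H', 8: 'I', 9: 'J', 10: 'K', 11: 'L',
--              12: 'M', 13: 'N', 14: 'O', 15: 'P', 16: 'Q', 17: 'R',
--              18: 'S', 19: 'T', 20: 'U', 21: 'V', 22: 'W', 23: 'X',
--              24: 'Y', 25: 'Z', 26: 'a', 27: 'b', 28: 'c', 29: 'd',
--              30: 'e', 31: 'f', 32: 'g', 33: 'h', 34: 'i', 35: 'j',
--              36: 'k', 37: 'l', 38: 'm', 39: 'n', 40: 'o', 41: 'p',
--              42: 'q', 43: 'r', 44: 's', 45: 't', 46: 'u', 47: 'v',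
--              48: 'w', 49: 'x', 50: 'y', 51: 'z', 52: '0', 53: '1', 54: '2',
--              55: '3', 56: '4', 57: '5', 58: '6', 59: '7', 60: '8', 61: '9',
--              62: "+", 63: "/"}
--
--     bin = hex2binary(cypher)
--
--     pad = 6 - len(bin) % 6
--     bin = "0"*pad + bin
--
--     for i in range(0, len(bin), 6):
--         part = bin[slice(i,i+6)]
--         encode += index[int(part, 2)]
--
--     return encode
-- ===== SOURCE B (Python) =====
-- def hex2b64(cypher):
--     """
--     Converts hexadecimal to base 64.
--
--     - cypher: the hexadecimal to convert to base 64
--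
--     Return: the base64 value
--     """
--     dec = int(cypher, 16)
--     alphabet = "ABCDEFGHIJKLMNOPQRSTUVWXYZabcdefghijklmnopqrstuvwxyz0123456789+/"
--     digits = []
--     for _ in range(dec.bit_length() // 6 + 1):
--         digits.append(alphabet[dec % 64])
--         dec //= 64
--     return ''.join(reversed(digits))
-- ===== Notes on version B (the rewrite author's own statement) =====
-- stated objective: simpler
-- what changed: B extracts each 6-bit base64 digit arithmetically (dec // 64**k % 64 over bit_length()//6+1 groups) instead of building a binary string digit-by-digit, padding it, and slicing-and-reparsing 6-character windows.
import Mathlib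
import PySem

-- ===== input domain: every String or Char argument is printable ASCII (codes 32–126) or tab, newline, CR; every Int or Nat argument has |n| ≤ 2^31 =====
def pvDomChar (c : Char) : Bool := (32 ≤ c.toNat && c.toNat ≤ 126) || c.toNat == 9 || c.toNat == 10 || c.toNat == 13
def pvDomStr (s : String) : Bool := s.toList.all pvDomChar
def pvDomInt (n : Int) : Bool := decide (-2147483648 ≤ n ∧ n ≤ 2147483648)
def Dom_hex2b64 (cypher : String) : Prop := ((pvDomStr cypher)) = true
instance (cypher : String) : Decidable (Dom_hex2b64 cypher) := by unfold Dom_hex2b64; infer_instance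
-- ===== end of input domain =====

-- B replaces A's build-a-binary-string / pad / slice-and-reparse pipeline by direct
-- arithmetic extraction of the base-64 digits (dec // 64**k % 64); same value on every
-- input where A returns (valid hex denoting a non-negative integer).

-- ===== PORT A =====
-- A's 64-entry dict index {0:'A', …, 63:'/'}: the same mapping as a positional lookup
-- (keys are exactly 0..63 in order; the default is unreachable for keys 0..63).
def pvAlphabet : List Char :=
  "ABCDEFGHIJKLMNOPQRSTUVWXYZabcdefghijklmnopqrstuvwxyz0123456789+/".toList

def pvIndex (v : Int) : Char := (PySem.List.pyGet? pvAlphabet v).getD ' '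

-- the while-loop of hex2binary: `while dec != 0: bin = str(dec % 2) + bin; dec //= 2`
-- (dec is non-negative under Pre_; Python diverges on negative dec, which Pre_ excludes)
def pvBinLoop (dec : Nat) (bin : List Char) : List Char :=
  if dec = 0 then bin
  else pvBinLoop (dec / 2) ((if dec % 2 = 1 then '1' else '0') :: bin)
  termination_by dec
  decreasing_by exact Nat.div_lt_self (Nat.pos_of_ne_zero (by assumption)) (by omega)

def hex2binary (cypher : String) : String :=
  match PySem.Int.ofStrBase? cypher 16 with
  | none => ""   -- int(cypher, 16) raises ValueError: excluded by Pre_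
  | some dec => String.ofList (pvBinLoop dec.toNat [])

-- the for-loop `for i in range(0, len(bin), 6): encode += index[int(bin[i:i+6], 2)]`
-- (int(part, 2) never raises here: part is a non-empty string of '0'/'1')
def pvEncLoop (bl : List Char) (i : Nat) (enc : List Char) : List Char :=
  if i < bl.length then
    pvEncLoop bl (i + 6)
      (enc ++ [pvIndex ((PySem.Int.ofCharsBase? (PySem.List.slice bl (some (i : Int)) (some ((i : Int) + 6))) 2).getD 0)])
  else enc
  termination_by bl.length - i
  decreasing_by omega

def hex2b64 (cypher : String) : String :=
  let bin := (hex2binary cypher).toList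
  let pad := 6 - bin.length % 6
  let bin2 := List.replicate pad '0' ++ bin
  String.ofList (pvEncLoop bin2 0 [])

-- ===== PORT B =====
-- the for-loop `for _ in range(dec.bit_length() // 6 + 1): digits.append(alphabet[dec % 64]); dec //= 64`
-- (the alphabet index dec % 64 is always in range 0..63)
def pvAltLoop : Nat → Int → List Char → List Char
  | 0, _, digits => digits
  | t + 1, dec, digits =>
    pvAltLoop t (PySem.Int.floordiv dec 64)
      (digits ++ [(PySem.List.pyGet? pvAlphabet (PySem.Int.mod dec 64)).getD ' '])

def hex2b64_alt (cypher : String) : String :=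
  match PySem.Int.ofStrBase? cypher 16 with
  | none => ""   -- int(cypher, 16) raises ValueError: excluded by Pre_
  | some dec =>
    String.ofList (pvAltLoop (PySem.Int.bitLength dec / 6 + 1) dec []).reverse

-- ===== PRECONDITION & SPEC =====
-- Pre_ admits exactly the inputs on which A returns: cypher must parse as hexadecimal
-- (else int() raises ValueError) and denote a non-negative integer (A's while-loop
-- never terminates on a negative one).
def Pre_hex2b64 (cypher : String) : Prop :=
  0 ≤ (PySem.Int.ofStrBase? cypher 16).getD (-1)
instance (cypher : String) : Decidable (Pre_hex2b64 cypher) := by unfold Pre_hex2b64; infer_instance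

def pvWitness_hex2b64 : String := "1f2e"

def Spec_hex2b64 (cypher : String) (out : String) : Prop := out = hex2b64_alt cypher
instance (cypher : String) (out : String) : Decidable (Spec_hex2b64 cypher out) := by unfold Spec_hex2b64; infer_instance

-- ===== CLAIM (what is proved, stated in full; the proofs are below) =====
def Claim_equal_hex2b64 : Prop := ∀ (cypher : String), Dom_hex2b64 cypher → Pre_hex2b64 cypher → Spec_hex2b64 cypher (hex2b64 cypher)

-- ===== LEMMAS AND PROOFS =====

-- the fixed-width big-endian binary rendering of m (low bit last)
def pvFixedBits : Nat → Nat → List Char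
  | 0, _ => []
  | k+1, m => pvFixedBits k (m / 2) ++ [if m % 2 = 1 then '1' else '0']

-- the common digit list, most significant base-64 digit first
def pvOut : Nat → Nat → List Char
  | 0, _ => []
  | n+1, m => pvIndex ((m / 64 ^ n % 64 : Nat) : Int) :: pvOut n m

lemma pvFixedBits_length (k m : Nat) : (pvFixedBits k m).length = k := by
  induction k generalizing m with
  | zero => rfl
  | succ k ih => simp [pvFixedBits, ih]

lemma pvFixedBits_zero (k : Nat) : pvFixedBits k 0 = List.replicate k '0' := by
  induction k with
  | zero => rfl
  | succ k ih => simp [pvFixedBits, ih, List.replicate_succ']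

lemma pvFixedBits_add (j k m : Nat) :
    pvFixedBits (k + j) m = pvFixedBits k (m / 2 ^ j) ++ pvFixedBits j m := by
  induction j generalizing m with
  | zero => simp [pvFixedBits]
  | succ j ih =>
    have h1 : k + (j + 1) = (k + j) + 1 := by omega
    rw [h1]
    show pvFixedBits (k + j) (m / 2) ++ _ = _
    rw [ih (m / 2), Nat.div_div_eq_div_mul]
    rw [show (2 : Nat) * 2 ^ j = 2 ^ (j + 1) from by rw [pow_succ]; ring]
    simp [pvFixedBits]

lemma pvFixedBits_mod (k m : Nat) : pvFixedBits k m = pvFixedBits k (m % 2 ^ k) := by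
  induction k generalizing m with
  | zero => rfl
  | succ k ih =>
    have hdvd : (2 : Nat) ∣ 2 ^ (k + 1) := dvd_pow_self 2 (by omega)
    have h1 : m % 2 ^ (k + 1) % 2 = m % 2 := Nat.mod_mod_of_dvd m hdvd
    have h2 : m % 2 ^ (k + 1) / 2 = m / 2 % 2 ^ k := by
      have := Nat.mod_mul_right_div_self m 2 (2 ^ k)
      rw [← pow_succ'] at this
      exact this
    show pvFixedBits k (m / 2) ++ _ = pvFixedBits k (m % 2 ^ (k+1) / 2) ++ _
    rw [h1, h2, ← ih (m / 2)]

-- A's binary loop accumulates on the right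
lemma pvBinLoop_acc (m : Nat) (acc : List Char) :
    pvBinLoop m acc = pvBinLoop m [] ++ acc := by
  induction m using Nat.strong_induction_on generalizing acc with
  | _ m ih =>
    by_cases h : m = 0
    · simp [h, pvBinLoop]
    · have hlt : m / 2 < m := Nat.div_lt_self (Nat.pos_of_ne_zero h) (by omega)
      have e : ∀ a, pvBinLoop m a = pvBinLoop (m / 2) ((if m % 2 = 1 then '1' else '0') :: a) :=
        fun a => by rw [pvBinLoop, if_neg h]
      rw [e acc, e [], ih (m / 2) hlt, ih (m / 2) hlt [_]]
      simp

-- A's binary string is the bitLength-wide rendering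
lemma pvBinLoop_eq (m : Nat) :
    pvBinLoop m [] = pvFixedBits (PySem.Int.bitLength (m : Int)) m := by
  induction m using Nat.strong_induction_on with
  | _ m ih =>
    by_cases h : m = 0
    · subst h; simp [pvBinLoop, PySem.Int.bitLength_zero, pvFixedBits]
    · rw [pvBinLoop, if_neg h, pvBinLoop_acc,
        ih (m / 2) (Nat.div_lt_self (Nat.pos_of_ne_zero h) (by omega)),
        PySem.Int.bitLength_natCast (Nat.pos_of_ne_zero h)]
      rfl

-- the six-bit windows parse back to their value
lemma pvParse6 : ∀ v : Nat, v < 64 →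
    PySem.Int.ofCharsBase? (pvFixedBits 6 v) 2 = some (v : Int) := by decide

-- A's chunk loop produces pvOut
lemma pvEncLoop_eq (n : Nat) (m : Nat) : ∀ (pre enc : List Char),
    pvEncLoop (pre ++ pvFixedBits (6 * n) m) pre.length enc = enc ++ pvOut n m := by
  induction n generalizing m with
  | zero =>
    intro pre enc
    rw [pvEncLoop]
    simp [pvFixedBits, pvOut]
  | succ n ih =>
    intro pre enc
    have hsplit : pvFixedBits (6 * (n + 1)) m
        = pvFixedBits 6 (m / 2 ^ (6 * n)) ++ pvFixedBits (6 * n) m := by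
      have : 6 * (n + 1) = 6 + 6 * n := by omega
      rw [this, pvFixedBits_add]
    rw [hsplit, pvEncLoop]
    have hlen : pre.length < (pre ++ (pvFixedBits 6 (m / 2 ^ (6 * n)) ++ pvFixedBits (6 * n) m)).length := by
      simp [pvFixedBits_length]
    rw [if_pos hlen]
    have hslice : PySem.List.slice (pre ++ (pvFixedBits 6 (m / 2 ^ (6 * n)) ++ pvFixedBits (6 * n) m))
        (some (pre.length : Int)) (some ((pre.length : Int) + 6)) = pvFixedBits 6 (m / 2 ^ (6 * n)) := by
      rw [show ((pre.length : Int) + 6) = ((pre.length : Int) + ((6 : Nat) : Int)) from by norm_num,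
        PySem.List.slice_natCast_add, List.drop_left, List.take_left' (pvFixedBits_length 6 _)]
    rw [hslice]
    have hmod : PySem.Int.ofCharsBase? (pvFixedBits 6 (m / 2 ^ (6 * n))) 2
        = some ((m / 2 ^ (6 * n) % 64 : Nat) : Int) := by
      rw [pvFixedBits_mod]
      exact pvParse6 _ (Nat.mod_lt _ (by omega))
    rw [hmod]
    have harr : pre.length + 6 = (pre ++ pvFixedBits 6 (m / 2 ^ (6 * n))).length := by
      simp [pvFixedBits_length]
    have hassoc : pre ++ (pvFixedBits 6 (m / 2 ^ (6 * n)) ++ pvFixedBits (6 * n) m)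
        = (pre ++ pvFixedBits 6 (m / 2 ^ (6 * n))) ++ pvFixedBits (6 * n) m := by
      simp
    rw [harr, hassoc, ih m]
    have hpow : (2 : Nat) ^ (6 * n) = 64 ^ n := by
      rw [pow_mul]; norm_num
    simp [pvOut, hpow]

-- pvOut, peeled from the low-order end
lemma pvOut_snoc (t m : Nat) :
    pvOut (t + 1) m = pvOut t (m / 64) ++ [pvIndex ((m % 64 : Nat) : Int)] := by
  induction t generalizing m with
  | zero => simp [pvOut]
  | succ t ih =>
    show pvIndex _ :: pvOut (t + 1) m = (pvIndex _ :: pvOut t (m / 64)) ++ _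
    rw [ih m]
    have : m / 64 ^ (t + 1) = m / 64 / 64 ^ t := by
      rw [Nat.div_div_eq_div_mul, ← pow_succ']
    rw [this]
    simp

-- B's divmod loop produces pvOut reversed
lemma pvAltLoop_eq (t : Nat) : ∀ (m : Nat) (digits : List Char),
    pvAltLoop t (m : Int) digits = digits ++ (pvOut t m).reverse := by
  induction t with
  | zero => intro m digits; simp [pvAltLoop, pvOut]
  | succ t ih =>
    intro m digits
    show pvAltLoop t (PySem.Int.floordiv (m : Int) 64) _ = _
    rw [show PySem.Int.floordiv ((m : Int)) 64 = ((m / 64 : Nat) : Int) from by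
        exact_mod_cast PySem.Int.floordiv_natCast m 64,
      ih (m / 64), pvOut_snoc t m]
    have : PySem.Int.mod ((m : Int)) 64 = ((m % 64 : Nat) : Int) := by
      exact_mod_cast PySem.Int.mod_natCast m 64
    rw [this]
    simp [pvIndex]

-- ===== VERDICT (by name: the statement is the Claim_ definition above) =====
theorem hex2b64_spec : Claim_equal_hex2b64 := by
  intro cypher _ hpre
  unfold Spec_hex2b64 hex2b64 hex2b64_alt hex2binary
  unfold Pre_hex2b64 at hpre
  cases hp : PySem.Int.ofStrBase? cypher 16 with
  | none => rw [hp] at hpre; simp at hpre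
  | some dec =>
    rw [hp] at hpre
    dsimp only
    simp only [Option.getD_some] at hpre
    obtain ⟨m, rfl⟩ : ∃ m : Nat, dec = (m : Int) := ⟨dec.toNat, by omega⟩
    simp only [Int.toNat_natCast, String.toList_ofList]
    set L : Nat := PySem.Int.bitLength (m : Int) with hL
    rw [pvBinLoop_eq m, ← hL]
    have hlen : (pvFixedBits L m).length = L := pvFixedBits_length L m
    rw [hlen]
    set n : Nat := L / 6 + 1 with hn
    have hpad : (6 - L % 6) + L = 6 * n := by omega
    have hm : m < 2 ^ L := by
      have := PySem.Int.lt_two_pow_bitLength (m : Int)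
      simpa [hL] using this
    have hrep : List.replicate (6 - L % 6) '0' ++ pvFixedBits L m = pvFixedBits (6 * n) m := by
      rw [← hpad, pvFixedBits_add (j := L) (k := 6 - L % 6) m,
        Nat.div_eq_of_lt hm, pvFixedBits_zero]
    rw [hrep]
    have hA := pvEncLoop_eq n m [] []
    simp only [List.nil_append, List.length_nil] at hA
    rw [hA]
    rw [pvAltLoop_eq n m []]
    simp
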